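-- pv_equiv track=rewrite | github.com/cjb230/advent_of_code_2021 | day_11_a.py | process_flashes
-- ===== SOURCE A (Python) =====
-- def process_flashes(start_state: dict, flashes: set) -> dict:
--     for this_flash in flashes:
--         row, col = this_flash[0], this_flash[1]
--         for row_offset in [-1, 0, 1]:
--             for col_offset in [-1, 0, 1]:
--                 if not (row_offset == 0 and col_offset == 0):
--                     try:
--                         start_state[row+row_offset][col+col_offset] += 1
--                     except KeyError:
--                         pass
--     return start_state
-- ===== SOURCE B (Python) =====
-- def process_flashes(start_state: dict, flashes: set) -> dict:
--     # Two-pass: tally every flash-neighbour target once, then apply the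
--     # aggregated counts in a single pass over the tally.
--     targets = [(fr + ro, fc + co)
--                for fr, fc in flashes
--                for ro in (-1, 0, 1)
--                for co in (-1, 0, 1)
--                if ro != 0 or co != 0]
--     hits = {}
--     for t in targets:
--         hits[t] = hits.get(t, 0) + 1
--     for (r, c), n in hits.items():
--         try:
--             start_state[r][c] += n
--         except KeyError:
--             pass
--     return start_state
-- ===== Notes on version B (the rewrite author's own statement) =====
-- stated objective: alternative
-- what changed: A scatters per flash, try/except-incrementing each of the 8 neighbour cells by 1 as it goes; B first tallies all flash-neighbour targets into a dict (coordinate -> hit count) and then applies each aggregated count in one step in a single pass over the tally; Pre_ only excludes association lists with duplicate row or column keys, which do not represent a Python dict (both functions mutate start_state in place and return it).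
import Mathlib
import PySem

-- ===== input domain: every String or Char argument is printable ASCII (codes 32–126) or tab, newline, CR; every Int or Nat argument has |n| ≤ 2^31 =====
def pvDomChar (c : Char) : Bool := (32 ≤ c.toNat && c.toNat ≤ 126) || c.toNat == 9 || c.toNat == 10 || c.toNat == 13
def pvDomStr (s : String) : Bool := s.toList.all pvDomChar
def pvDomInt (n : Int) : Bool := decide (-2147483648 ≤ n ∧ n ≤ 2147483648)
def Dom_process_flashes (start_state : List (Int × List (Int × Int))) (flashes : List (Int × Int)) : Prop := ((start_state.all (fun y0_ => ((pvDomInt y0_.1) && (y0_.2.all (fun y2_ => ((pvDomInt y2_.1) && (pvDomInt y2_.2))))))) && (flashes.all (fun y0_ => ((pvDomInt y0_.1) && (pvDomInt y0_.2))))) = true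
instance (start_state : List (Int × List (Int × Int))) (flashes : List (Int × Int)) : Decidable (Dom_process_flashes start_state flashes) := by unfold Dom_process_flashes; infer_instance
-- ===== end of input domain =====

-- B replaces A's per-flash scatter (try/except-increment each of the 8 neighbours by 1) with a
-- two-pass tally-then-apply: a dict tallying every flash-neighbour target, then one pass adding
-- each aggregated count — alternative decomposition, no speed claim. Both Pythons mutate
-- start_state in place and return it; the equivalence here is about the returned value.

-- ===== PORT A =====
-- start_state[c] = v on the first entry with key c (Python dict overwrite keeps position)
def pfSetRow (d : List (Int × Int)) (c v : Int) : List (Int × Int) :=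
  match d with
  | [] => []
  | (k, w) :: rest => if k = c then (k, v) :: rest else (k, w) :: pfSetRow rest c v

def pfSetOuter (s : List (Int × List (Int × Int))) (r : Int) (v : List (Int × Int)) :
    List (Int × List (Int × Int)) :=
  match s with
  | [] => []
  | (k, w) :: rest => if k = r then (k, v) :: rest else (k, w) :: pfSetOuter rest r v

-- try: start_state[r][c] += 1  except KeyError: pass   (lookup row, lookup col, write back)
def pfTryInc (s : List (Int × List (Int × Int))) (r c : Int) :
    List (Int × List (Int × Int)) :=
  match List.lookup r s with
  | none => s
  | some rowd =>
    match List.lookup c rowd with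
    | none => s
    | some v => pfSetOuter s r (pfSetRow rowd c (v + 1))

def process_flashes (start_state : List (Int × List (Int × Int))) (flashes : List (Int × Int)) : List (Int × List (Int × Int)) :=
  flashes.foldl (fun st this_flash =>
    let row := this_flash.1
    let col := this_flash.2
    ([-1, 0, 1] : List Int).foldl (fun st2 row_offset =>
      ([-1, 0, 1] : List Int).foldl (fun st3 col_offset =>
        if ¬ (row_offset = 0 ∧ col_offset = 0) then
          pfTryInc st3 (row + row_offset) (col + col_offset)
        else st3) st2) st) start_state

-- ===== PORT B =====
-- the targets comprehension of Source B
def pfTargets (flashes : List (Int × Int)) : List (Int × Int) :=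
  flashes.flatMap (fun f =>
    ([-1, 0, 1] : List Int).flatMap (fun ro =>
      (([-1, 0, 1] : List Int).filter (fun co => ro != 0 || co != 0)).map
        (fun co => (f.1 + ro, f.2 + co))))

-- try: start_state[r][c] += n  except KeyError: pass
def pfTryIncBy (s : List (Int × List (Int × Int))) (r c n : Int) :
    List (Int × List (Int × Int)) :=
  match List.lookup r s with
  | none => s
  | some rowd =>
    match List.lookup c rowd with
    | none => s
    | some v => pfSetOuter s r (pfSetRow rowd c (v + n))

def process_flashes_alt (start_state : List (Int × List (Int × Int))) (flashes : List (Int × Int)) : List (Int × List (Int × Int)) :=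
  let targets := pfTargets flashes
  let hits := targets.foldl (fun d t => d.insert t (d.getD t 0 + 1))
    (PySem.Dict.empty : PySem.Dict (Int × Int) Int)
  hits.items.foldl (fun st kv => pfTryIncBy st kv.1.1 kv.1.2 kv.2) start_state

-- ===== PRECONDITION & SPEC =====
-- Pre_ excludes association lists with a duplicate row key or a duplicate column key within a
-- row: those do not represent a Python dict (A's and B's inputs), so no Python-reachable input
-- is excluded.
def Pre_process_flashes (start_state : List (Int × List (Int × Int))) (flashes : List (Int × Int)) : Prop :=
  (start_state.map Prod.fst).Nodup ∧ ∀ rowe ∈ start_state, (rowe.2.map Prod.fst).Nodup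

instance (start_state : List (Int × List (Int × Int))) (flashes : List (Int × Int)) : Decidable (Pre_process_flashes start_state flashes) := by unfold Pre_process_flashes; infer_instance

def pvWitness_process_flashes : (List (Int × List (Int × Int))) × (List (Int × Int)) :=
  ([(0, [(0, 3), (1, 5)]), (1, [(0, 2)])], [(1, 1), (5, 5)])

def Spec_process_flashes (start_state : List (Int × List (Int × Int))) (flashes : List (Int × Int)) (out : List (Int × List (Int × Int))) : Prop := out = process_flashes_alt start_state flashes
instance (start_state : List (Int × List (Int × Int))) (flashes : List (Int × Int)) (out : List (Int × List (Int × Int))) : Decidable (Spec_process_flashes start_state flashes out) := by unfold Spec_process_flashes; infer_instance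

-- ===== CLAIM (what is proved, stated in full; the proofs are below) =====
def Claim_equal_process_flashes : Prop := ∀ (start_state : List (Int × List (Int × Int))) (flashes : List (Int × Int)), Dom_process_flashes start_state flashes → Pre_process_flashes start_state flashes → Spec_process_flashes start_state flashes (process_flashes start_state flashes)

-- ===== LEMMAS AND PROOFS =====

-- "add g(row,col) to every cell": the normal form both programs are reduced to
def pvBump (g : Int → Int → Int) (s : List (Int × List (Int × Int))) :
    List (Int × List (Int × Int)) :=
  s.map (fun rowe =>
    (rowe.1, rowe.2.map (fun ce => (ce.1, ce.2 + g rowe.1 ce.1))))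

-- hit count of cell (row, col): flashes at Chebyshev distance exactly 1
def pvHits (flashes : List (Int × Int)) (row col : Int) : Int :=
  ((flashes.filter
      (fun f => max (f.1 - row).natAbs (f.2 - col).natAbs == 1)).length : Int)

-- total tallied increment that a key/value list applies at coordinate (a, b)
def pvSumAt (L : List ((Int × Int) × Int)) (a b : Int) : Int :=
  ((L.filter (fun kv => kv.1 == (a, b))).map Prod.snd).sum

theorem pvBump_ext (g g' : Int → Int → Int) (s : List (Int × List (Int × Int)))
    (h : ∀ a b, g a b = g' a b) : pvBump g s = pvBump g' s := by
  simp only [pvBump]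
  refine List.map_congr_left (fun rowe _ => ?_)
  exact congrArg _ (List.map_congr_left (fun ce _ => by rw [h]))

theorem pvBump_zero (s : List (Int × List (Int × Int))) :
    pvBump (fun _ _ => 0) s = s := by
  simp [pvBump]

theorem pvBump_comp (g h : Int → Int → Int) (s : List (Int × List (Int × Int))) :
    pvBump g (pvBump h s) = pvBump (fun a b => h a b + g a b) s := by
  simp only [pvBump, List.map_map]
  refine List.map_congr_left (fun rowe _ => ?_)
  simp [List.map_map, Function.comp, add_assoc]

theorem pvBump_pre (g : Int → Int → Int) (s : List (Int × List (Int × Int)))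
    (fl : List (Int × Int)) (h : Pre_process_flashes s fl) :
    Pre_process_flashes (pvBump g s) fl := by
  obtain ⟨h1, h2⟩ := h
  constructor
  · simpa [pvBump, List.map_map, Function.comp] using h1
  · intro rowe hr
    simp only [pvBump, List.mem_map] at hr
    obtain ⟨rowe0, hr0, rfl⟩ := hr
    simpa [List.map_map, Function.comp] using h2 rowe0 hr0

theorem pf_mapAdd0Inner (d : List (Int × Int)) (c n : Int)
    (h : ∀ ce ∈ d, ce.1 ≠ c) :
    d.map (fun ce => (ce.1, ce.2 + if ce.1 = c then n else 0)) = d := by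
  induction d with
  | nil => rfl
  | cons hd tl ih =>
    have h1 := h hd (by simp)
    simp only [List.map_cons, if_neg h1, add_zero]
    rw [ih (fun ce hc => h ce (by simp [hc]))]

theorem pf_lookup_none {β : Type} (d : List (Int × β)) (c : Int)
    (h : List.lookup c d = none) : ∀ ce ∈ d, ce.1 ≠ c := by
  intro ce hc he
  have := List.lookup_eq_none_iff.mp h ce hc
  simp [he] at this

theorem pf_rowInc (d : List (Int × Int)) (c n : Int)
    (hnd : (d.map Prod.fst).Nodup) :
    (match List.lookup c d with
     | none => d
     | some v => pfSetRow d c (v + n))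
    = d.map (fun ce => (ce.1, ce.2 + if ce.1 = c then n else 0)) := by
  induction d with
  | nil => rfl
  | cons hd tl ih =>
    obtain ⟨k, w⟩ := hd
    simp only [List.map_cons, List.nodup_cons] at hnd
    obtain ⟨hk_notin, hnd_tl⟩ := hnd
    by_cases hk : k = c
    · subst hk
      have hne : ∀ ce ∈ tl, ce.1 ≠ k :=
        fun ce hc he => hk_notin (he ▸ List.mem_map_of_mem hc)
      simp only [List.lookup_cons, beq_self_eq_true, if_true, pfSetRow, List.map_cons]
      rw [pf_mapAdd0Inner tl k n hne]
    · have hkc : c ≠ k := fun h => hk h.symm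
      have hbe : (c == k) = false := beq_eq_false_iff_ne.mpr hkc
      have hlk : List.lookup c ((k, w) :: tl) = List.lookup c tl := by
        simp [List.lookup_cons, hbe]
      have hmap := ih hnd_tl
      cases hl : List.lookup c tl with
      | none =>
        rw [hl] at hmap
        simp only [hlk, hl, List.map_cons, if_neg hk, add_zero]
        exact congrArg _ hmap
      | some v =>
        rw [hl] at hmap
        simp only [hlk, hl, pfSetRow, if_neg hk, List.map_cons, add_zero]
        exact congrArg _ hmap

theorem pf_mapAdd0Outer (s : List (Int × List (Int × Int))) (r c n : Int)
    (h : ∀ rowe ∈ s, rowe.1 ≠ r) :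
    s.map (fun rowe =>
      (rowe.1, rowe.2.map (fun ce => (ce.1, ce.2 + if rowe.1 = r ∧ ce.1 = c then n else 0)))) = s := by
  induction s with
  | nil => rfl
  | cons hd tl ih =>
    have h1 := h hd (by simp)
    simp only [List.map_cons]
    have hrow : hd.2.map (fun ce => (ce.1, ce.2 + if hd.1 = r ∧ ce.1 = c then n else 0)) = hd.2 := by
      calc hd.2.map (fun ce => (ce.1, ce.2 + if hd.1 = r ∧ ce.1 = c then n else 0))
          = hd.2.map (fun ce => (ce.1, ce.2)) :=
            List.map_congr_left (fun ce _ => by rw [if_neg (fun hc => h1 hc.1), add_zero])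
        _ = hd.2 := by simp
    rw [hrow, ih (fun rowe hm => h rowe (by simp [hm]))]

theorem pf_pointIncBy (s : List (Int × List (Int × Int))) (r c n : Int)
    (hnd : (s.map Prod.fst).Nodup)
    (hin : ∀ rowe ∈ s, (rowe.2.map Prod.fst).Nodup) :
    pfTryIncBy s r c n = pvBump (fun a b => if a = r ∧ b = c then n else 0) s := by
  induction s with
  | nil => rfl
  | cons hd tl ih =>
    obtain ⟨k, rowd⟩ := hd
    simp only [List.map_cons, List.nodup_cons] at hnd
    obtain ⟨hk_notin, hnd_tl⟩ := hnd
    have hin_hd : (rowd.map Prod.fst).Nodup := hin (k, rowd) (by simp)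
    have hin_tl : ∀ rowe ∈ tl, (rowe.2.map Prod.fst).Nodup :=
      fun rowe hm => hin rowe (by simp [hm])
    have htl_ne : ∀ rowe ∈ tl, rowe.1 ≠ k := by
      intro rowe hm he
      exact hk_notin (he ▸ List.mem_map_of_mem hm)
    by_cases hk : k = r
    · subst hk
      have hlk : List.lookup k ((k, rowd) :: tl) = some rowd := by
        simp
      cases hl : List.lookup c rowd with
      | none =>
        have hne := pf_lookup_none rowd c hl
        simp only [pfTryIncBy, hlk, hl, pvBump, List.map_cons, true_and,
          pf_mapAdd0Inner rowd c n hne, pf_mapAdd0Outer tl k c n htl_ne]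
      | some v =>
        have hri := pf_rowInc rowd c n hin_hd
        rw [hl] at hri
        simp only [pfTryIncBy, hlk, hl, pfSetOuter, pvBump, List.map_cons,
          if_true, true_and, ← hri, pf_mapAdd0Outer tl k c n htl_ne]
    · have hkr : r ≠ k := fun h => hk h.symm
      have hbe : (r == k) = false := beq_eq_false_iff_ne.mpr hkr
      have hlk : List.lookup r ((k, rowd) :: tl) = List.lookup r tl := by
        simp [List.lookup_cons, hbe]
      have hrow : rowd.map (fun ce => (ce.1, ce.2 + if k = r ∧ ce.1 = c then n else 0)) = rowd := by
        calc rowd.map (fun ce => (ce.1, ce.2 + if k = r ∧ ce.1 = c then n else 0))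
            = rowd.map (fun ce => (ce.1, ce.2)) :=
              List.map_congr_left (fun ce _ => by rw [if_neg (fun hc => hk hc.1), add_zero])
          _ = rowd := by simp
      have ihe := ih hnd_tl hin_tl
      simp only [pvBump] at ihe ⊢
      cases hl : List.lookup r tl with
      | none =>
        simp only [pfTryIncBy, hlk, hl, List.map_cons, hrow]
        simp only [pfTryIncBy, hl] at ihe
        rw [← ihe]
      | some rowd' =>
        cases hl2 : List.lookup c rowd' with
        | none =>
          simp only [pfTryIncBy, hlk, hl, hl2, List.map_cons, hrow]
          simp only [pfTryIncBy, hl, hl2] at ihe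
          rw [← ihe]
        | some v =>
          simp only [pfTryIncBy, hlk, hl, hl2, pfSetOuter, if_neg hk, List.map_cons, hrow]
          simp only [pfTryIncBy, hl, hl2] at ihe
          rw [ihe]

theorem pf_tryInc_eq (s : List (Int × List (Int × Int))) (r c : Int) :
    pfTryInc s r c = pfTryIncBy s r c 1 := rfl

theorem pf_pointInc (s : List (Int × List (Int × Int))) (r c : Int)
    (hnd : (s.map Prod.fst).Nodup)
    (hin : ∀ rowe ∈ s, (rowe.2.map Prod.fst).Nodup) :
    pfTryInc s r c = pvBump (fun a b => if a = r ∧ b = c then 1 else 0) s := by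
  rw [pf_tryInc_eq]
  exact pf_pointIncBy s r c 1 hnd hin

-- one flash's nine offset iterations = add the Chebyshev-distance-1 indicator to every cell
theorem pf_oneFlash (s : List (Int × List (Int × Int))) (fl : List (Int × Int))
    (fr fc : Int) (hpre : Pre_process_flashes s fl) :
    ([-1, 0, 1] : List Int).foldl (fun st2 row_offset =>
      ([-1, 0, 1] : List Int).foldl (fun st3 col_offset =>
        if ¬ (row_offset = 0 ∧ col_offset = 0) then
          pfTryInc st3 (fr + row_offset) (fc + col_offset)
        else st3) st2) s
    = pvBump (fun a b => if max (fr - a).natAbs (fc - b).natAbs = 1 then 1 else 0) s := by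
  obtain ⟨h1, h2⟩ := hpre
  have step : ∀ (t : List (Int × List (Int × Int))) (g : Int → Int → Int) (r c : Int),
      t = pvBump g s → Pre_process_flashes s fl →
      pfTryInc t r c = pvBump (fun a b => g a b + if a = r ∧ b = c then 1 else 0) s := by
    intro t g r c ht hp
    subst ht
    have hp' := pvBump_pre g s fl hp
    rw [pf_pointInc _ r c hp'.1 hp'.2, pvBump_comp]
  simp only [List.foldl]
  norm_num
  have e0 : s = pvBump (fun _ _ => 0) s := (pvBump_zero s).symm
  have e1 := step _ _ (fr + -1) (fc + -1) e0 ⟨h1, h2⟩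
  have e2 := step _ _ (fr + -1) fc e1 ⟨h1, h2⟩
  have e3 := step _ _ (fr + -1) (fc + 1) e2 ⟨h1, h2⟩
  have e4 := step _ _ fr (fc + -1) e3 ⟨h1, h2⟩
  have e5 := step _ _ fr (fc + 1) e4 ⟨h1, h2⟩
  have e6 := step _ _ (fr + 1) (fc + -1) e5 ⟨h1, h2⟩
  have e7 := step _ _ (fr + 1) fc e6 ⟨h1, h2⟩
  have e8 := step _ _ (fr + 1) (fc + 1) e7 ⟨h1, h2⟩
  rw [e8]
  refine pvBump_ext _ _ s (fun a b => ?_)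
  split_ifs <;> omega

theorem pf_hits_cons (f : Int × Int) (rest : List (Int × Int)) (a b : Int) :
    pvHits (f :: rest) a b
    = (if max (f.1 - a).natAbs (f.2 - b).natAbs = 1 then 1 else 0) + pvHits rest a b := by
  simp only [pvHits, List.filter_cons]
  split_ifs <;> simp_all <;> omega

-- A's whole loop = add the hit count to every cell
theorem pf_main (fl : List (Int × Int)) :
    ∀ s : List (Int × List (Int × Int)), Pre_process_flashes s fl →
      process_flashes s fl = pvBump (fun a b => pvHits fl a b) s := by
  induction fl with
  | nil =>
    intro s _
    simp only [process_flashes, List.foldl_nil]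
    refine ((pvBump_zero s).symm.trans (pvBump_ext _ _ s (fun a b => ?_)))
    simp [pvHits]
  | cons f rest ih =>
    intro s hpre
    have hone := pf_oneFlash s rest f.1 f.2 ⟨hpre.1, hpre.2⟩
    have hpre' : Pre_process_flashes
        (pvBump (fun a b => if max (f.1 - a).natAbs (f.2 - b).natAbs = 1 then 1 else 0) s) rest :=
      pvBump_pre _ s rest ⟨hpre.1, hpre.2⟩
    simp only [process_flashes, List.foldl_cons] at *
    rw [hone, ih _ hpre', pvBump_comp]
    refine pvBump_ext _ _ s (fun a b => ?_)
    rw [pf_hits_cons]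

-- B's apply pass = add the tallied totals to every cell
theorem pf_applyAll (L : List ((Int × Int) × Int)) :
    ∀ (s : List (Int × List (Int × Int))) (fl : List (Int × Int)),
      Pre_process_flashes s fl →
      L.foldl (fun st kv => pfTryIncBy st kv.1.1 kv.1.2 kv.2) s
        = pvBump (fun a b => pvSumAt L a b) s := by
  induction L with
  | nil =>
    intro s fl _
    simp only [List.foldl_nil]
    refine ((pvBump_zero s).symm.trans (pvBump_ext _ _ s (fun a b => ?_)))
    simp [pvSumAt]
  | cons kv rest ih =>
    intro s fl hpre
    obtain ⟨⟨k1, k2⟩, n⟩ := kv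
    have hpt := pf_pointIncBy s k1 k2 n hpre.1 hpre.2
    have hpre' := pvBump_pre (fun a b => if a = k1 ∧ b = k2 then n else 0) s fl hpre
    simp only [List.foldl_cons]
    rw [hpt, ih _ fl hpre', pvBump_comp]
    refine pvBump_ext _ _ s (fun a b => ?_)
    simp only [pvSumAt, List.filter_cons]
    by_cases h1 : a = k1 ∧ b = k2
    · obtain ⟨rfl, rfl⟩ := h1
      simp
    · have hne : (k1, k2) ≠ (a, b) := by
        intro he
        injection he with e1 e2
        exact h1 ⟨e1.symm, e2.symm⟩
      have hbe : (((k1, k2), n).1 == (a, b)) = false := beq_eq_false_iff_ne.mpr hne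
      simp [hbe, if_neg h1]

-- the tallied total over a distinct-key list built by mapping a count function
theorem pf_sumAt_distinct (ks : List (Int × Int)) (cnt : (Int × Int) → Int) (a b : Int)
    (h : ks.Nodup) :
    pvSumAt (ks.map (fun k => (k, cnt k))) a b
      = if (a, b) ∈ ks then cnt (a, b) else 0 := by
  induction ks with
  | nil => simp [pvSumAt]
  | cons k rest ih =>
    simp only [List.nodup_cons] at h
    obtain ⟨hk, hnd⟩ := h
    by_cases hc : k = (a, b)
    · have hnm : (a, b) ∉ rest := hc ▸ hk
      have h0 := ih hnd
      rw [if_neg hnm] at h0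
      simp only [List.map_cons, pvSumAt] at h0 ⊢
      simp [List.filter_cons, hc, h0]
    · have hbe : (k == (a, b)) = false := beq_eq_false_iff_ne.mpr hc
      have hne : ¬ (a, b) = k := fun h => hc h.symm
      simp only [List.map_cons, pvSumAt, List.filter_cons, hbe, Bool.false_eq_true,
        if_false, List.mem_cons] at *
      rw [ih hnd]
      simp [hne]

-- count of (a, b) among one flash's eight targets = the Chebyshev-distance-1 indicator
theorem pf_count_inner (f : Int × Int) (a b : Int) :
    ((([-1, 0, 1] : List Int).flatMap (fun ro =>
        (([-1, 0, 1] : List Int).filter (fun co => ro != 0 || co != 0)).map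
          (fun co => (f.1 + ro, f.2 + co)))).count (a, b) : Int)
      = if max (f.1 - a).natAbs (f.2 - b).natAbs = 1 then 1 else 0 := by
  simp only [List.flatMap_cons, List.flatMap_nil, List.filter_cons, List.filter_nil]
  norm_num [List.count_cons, List.count_nil, Prod.mk.injEq]
  split_ifs <;> omega

theorem pf_count_targets (fl : List (Int × Int)) (a b : Int) :
    (((pfTargets fl).count (a, b) : Int)) = pvHits fl a b := by
  induction fl with
  | nil => simp [pfTargets, pvHits]
  | cons f rest ih =>
    have hsplit : pfTargets (f :: rest)
        = (([-1, 0, 1] : List Int).flatMap (fun ro =>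
            (([-1, 0, 1] : List Int).filter (fun co => ro != 0 || co != 0)).map
              (fun co => (f.1 + ro, f.2 + co)))) ++ pfTargets rest := by
      simp [pfTargets]
    rw [hsplit, List.count_append, pf_hits_cons]
    push_cast
    rw [ih, pf_count_inner]

-- B's tally dict is Counter(targets)
theorem pf_alt_eq (s : List (Int × List (Int × Int))) (fl : List (Int × Int)) :
    process_flashes_alt s fl
      = (PySem.Dict.counter (pfTargets fl)).items.foldl
          (fun st kv => pfTryIncBy st kv.1.1 kv.1.2 kv.2) s := rfl

-- ===== VERDICT (by name: the statement is the Claim_ definition above) =====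
theorem process_flashes_spec : Claim_equal_process_flashes := by
  intro s fl _ hpre
  unfold Spec_process_flashes
  rw [pf_main fl s hpre, pf_alt_eq, pf_applyAll _ s fl hpre]
  refine (pvBump_ext _ _ s (fun a b => ?_)).symm
  rw [PySem.Dict.items_counter]
  rw [pf_sumAt_distinct _ _ a b (PySem.Set.nodup_ofList _)]
  by_cases hm : (a, b) ∈ pfTargets fl
  · rw [if_pos ((PySem.Set.mem_ofList _ _).mpr hm), pf_count_targets]
  · rw [if_neg (fun h => hm ((PySem.Set.mem_ofList _ _).mp h)), ← pf_count_targets fl a b,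
      List.count_eq_zero_of_not_mem hm]
    simp
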